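-- pv_equiv track=rewrite | github.com/jonubhab/Wordle | Wordle Hard Manual.py | slot
-- ===== SOURCE A (Python) =====
-- def slot(yellow,chr):
--     for i in range(5):
--         if chr in yellow[i]: return i
--     else:
--         for j in range(5):
--             for k in yellow[j]:
--                 if k!=" ": break
--             else: return j
-- ===== SOURCE B (Python) =====
-- def slot(yellow, chr):
--     first_empty = None
--     for i in range(5):
--         if chr in yellow[i]:
--             return i
--         if first_empty is None and all(k == " " for k in yellow[i]):
--             first_empty = i
--     return first_empty
-- ===== Notes on version B (the rewrite author's own statement) =====
-- stated objective: simpler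
-- what changed: A's two sequential priority scans (first for a chr match, then a fresh scan for an all-space slot) are merged into one pass that returns on a chr match and maintains a once-set first-empty candidate returned at the end.
import Mathlib
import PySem

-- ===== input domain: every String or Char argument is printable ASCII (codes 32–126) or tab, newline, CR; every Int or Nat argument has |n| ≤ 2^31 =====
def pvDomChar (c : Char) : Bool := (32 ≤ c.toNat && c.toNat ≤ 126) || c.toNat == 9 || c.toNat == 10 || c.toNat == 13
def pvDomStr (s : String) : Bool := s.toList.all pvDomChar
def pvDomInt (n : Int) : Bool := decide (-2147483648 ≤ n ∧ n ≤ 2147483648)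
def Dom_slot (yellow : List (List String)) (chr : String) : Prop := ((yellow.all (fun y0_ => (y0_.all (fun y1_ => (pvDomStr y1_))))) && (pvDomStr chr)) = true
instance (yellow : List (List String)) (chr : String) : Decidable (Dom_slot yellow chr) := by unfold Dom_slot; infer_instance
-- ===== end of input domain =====

-- B merges A's two priority-ordered scans into one pass keeping a first-empty candidate; simpler, same cost.

-- ===== PORT A =====
-- inner 'for k in yellow[j]: if k!=" ": break / else: return j' — true iff the loop finishes without break
def slotA_inner (row : List String) : Bool :=
  match row with
  | [] => true
  | k :: rest => if k ≠ " " then false else slotA_inner rest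

-- second loop 'for j in range(5): …' starting at j; none on IndexError or fall-through
def slotA_loop2 (yellow : List (List String)) (j : Nat) : Option Int :=
  if j < 5 then
    match PySem.List.pyGet? yellow (Int.ofNat j) with
    | none => none        -- IndexError (excluded by Pre_slot)
    | some row => if slotA_inner row then some (Int.ofNat j) else slotA_loop2 yellow (j + 1)
  else none
termination_by 5 - j

-- first loop 'for i in range(5): …'; on completion falls into the second loop from 0
def slotA_loop1 (yellow : List (List String)) (chr : String) (i : Nat) : Option Int :=
  if i < 5 then
    match PySem.List.pyGet? yellow (Int.ofNat i) with
    | none => none        -- IndexError (excluded by Pre_slot)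
    | some row => if chr ∈ row then some (Int.ofNat i) else slotA_loop1 yellow chr (i + 1)
  else slotA_loop2 yellow 0
termination_by 5 - i

def slot (yellow : List (List String)) (chr : String) : Option Int :=
  slotA_loop1 yellow chr 0

-- ===== PORT B =====
-- all(k == " " for k in row)
def slotB_allSpace (row : List String) : Bool := row.all (fun k => k == " ")

-- the single pass, carrying the once-set first_empty candidate
def slotB_loop (yellow : List (List String)) (chr : String) (i : Nat) (firstEmpty : Option Int) : Option Int :=
  if i < 5 then
    match PySem.List.pyGet? yellow (Int.ofNat i) with
    | none => none        -- IndexError (excluded by Pre_slot)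
    | some row =>
      if chr ∈ row then some (Int.ofNat i)
      else slotB_loop yellow chr (i + 1)
        (if firstEmpty = none ∧ slotB_allSpace row then some (Int.ofNat i) else firstEmpty)
  else firstEmpty
termination_by 5 - i

def slot_alt (yellow : List (List String)) (chr : String) : Option Int :=
  slotB_loop yellow chr 0 none

-- ===== PRECONDITION & SPEC =====
-- Pre_ excludes exactly the inputs where A raises IndexError: fewer than 5 rows and chr in none of them.
def Pre_slot (yellow : List (List String)) (chr : String) : Prop :=
  5 ≤ yellow.length ∨ ∃ ys ∈ yellow, chr ∈ ys
instance (yellow : List (List String)) (chr : String) : Decidable (Pre_slot yellow chr) := by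
  unfold Pre_slot; infer_instance
def pvWitness_slot : List (List String) × String := ([["a"], [" "], [], ["b"], ["c"]], "b")

def Spec_slot (yellow : List (List String)) (chr : String) (out : Option Int) : Prop := out = slot_alt yellow chr
instance (yellow : List (List String)) (chr : String) (out : Option Int) : Decidable (Spec_slot yellow chr out) := by unfold Spec_slot; infer_instance

-- ===== CLAIM (what is proved, stated in full; the proofs are below) =====
def Claim_equal_slot : Prop := ∀ (yellow : List (List String)) (chr : String), Dom_slot yellow chr → Pre_slot yellow chr → Spec_slot yellow chr (slot yellow chr)

-- ===== LEMMAS AND PROOFS =====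

theorem slotA_inner_eq_allSpace (row : List String) : slotA_inner row = slotB_allSpace row := by
  induction row with
  | nil => rfl
  | cons k rest ih =>
    simp only [slotA_inner, slotB_allSpace, List.all_cons]
    by_cases h : k = " "
    · simp [h, ih, slotB_allSpace]
    · simp [h]

-- long lists: both loops agree from i, provided the candidate fe matches what A's second scan
-- from 0 would produce relative to position i
theorem loops_agree_of_len (yellow : List (List String)) (chr : String) :
    ∀ n i fe, i + n = 5 → 5 ≤ yellow.length →
    (∀ x, fe = some x → slotA_loop2 yellow 0 = some x) →
    (fe = none → slotA_loop2 yellow 0 = slotA_loop2 yellow i) →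
    slotA_loop1 yellow chr i = slotB_loop yellow chr i fe := by
  intro n
  induction n with
  | zero =>
    intro i fe hi hlen hsome hnone
    have h5 : i = 5 := by omega
    subst h5
    rw [slotA_loop1, slotB_loop]
    simp only [show ¬ (5 < 5) from by omega, if_false]
    cases fe with
    | none => rw [hnone rfl, slotA_loop2]; simp
    | some x => exact hsome x rfl
  | succ n ih =>
    intro i fe hi hlen hsome hnone
    have hi5 : i < 5 := by omega
    have h : i < yellow.length := by omega
    have hget : PySem.List.pyGet? yellow (Int.ofNat i) = some (yellow[i]'h) := by
      simp [List.getElem?_eq_getElem h]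
    rw [slotA_loop1, slotB_loop]
    simp only [hi5, if_true, hget]
    by_cases hmem : chr ∈ (yellow[i]'h)
    · simp [hmem]
    · simp only [hmem, if_false]
      apply ih (i + 1) _ (by omega) hlen
      · intro x hx
        by_cases hfe : fe = none
        · subst hfe
          by_cases hsp : slotB_allSpace (yellow[i]'h) = true
          · simp only [hsp, and_true] at hx
            rw [hnone rfl, slotA_loop2]
            simp [hi5, slotA_inner_eq_allSpace, ← hx]
            simp [List.getElem?_eq_getElem h, hsp]
          · simp [hsp] at hx
        · obtain ⟨y, hy⟩ := Option.ne_none_iff_exists'.mp hfe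
          subst hy
          simp only [reduceCtorEq, false_and, if_false] at hx
          exact hsome x hx
      · intro hfe'
        by_cases hfe : fe = none
        · subst hfe
          by_cases hsp : slotB_allSpace (yellow[i]'h) = true
          · simp [hsp] at hfe'
          · rw [hnone rfl, slotA_loop2]
            simp [hi5, slotA_inner_eq_allSpace]
            simp [List.getElem?_eq_getElem h, hsp]
        · obtain ⟨y, hy⟩ := Option.ne_none_iff_exists'.mp hfe
          subst hy
          simp at hfe'

-- short lists: if chr occurs somewhere at or after i, both loops return that first index
theorem loops_agree_of_mem (yellow : List (List String)) (chr : String) :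
    ∀ n i fe, i + n = 5 → yellow.length < 5 →
    (∃ j, i ≤ j ∧ ∃ h : j < yellow.length, chr ∈ yellow[j]) →
    slotA_loop1 yellow chr i = slotB_loop yellow chr i fe := by
  intro n
  induction n with
  | zero =>
    intro i fe hi hlen ⟨j, hij, hj, _⟩
    omega
  | succ n ih =>
    intro i fe hi hlen hex
    obtain ⟨j, hij, hj, hmem⟩ := hex
    have hi5 : i < 5 := by omega
    have hilen : i < yellow.length := by omega
    have hget : PySem.List.pyGet? yellow (Int.ofNat i) = some (yellow[i]'hilen) := by
      simp [List.getElem?_eq_getElem hilen]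
    rw [slotA_loop1, slotB_loop]
    simp only [hi5, if_true, hget]
    by_cases hmemi : chr ∈ yellow[i]'hilen
    · simp [hmemi]
    · simp only [hmemi, if_false]
      apply ih (i + 1) _ (by omega) hlen
      refine ⟨j, ?_, hj, hmem⟩
      rcases Nat.lt_or_ge i j with h | h
      · omega
      · have : i = j := by omega
        subst this
        exact absurd hmem hmemi

-- ===== VERDICT (by name: the statement is the Claim_ definition above) =====
theorem slot_spec : Claim_equal_slot := by
  intro yellow chr _ hpre
  unfold Spec_slot slot slot_alt
  rcases Nat.lt_or_ge yellow.length 5 with hlen | hlen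
  · rcases hpre with h5 | ⟨ys, hys, hmem⟩
    · omega
    · obtain ⟨j, hj, hjy⟩ := List.mem_iff_getElem.mp hys
      exact loops_agree_of_mem yellow chr 5 0 none rfl hlen ⟨j, Nat.zero_le j, hj, hjy ▸ hmem⟩
  · exact loops_agree_of_len yellow chr 5 0 none rfl hlen (by simp) (fun _ => rfl)
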